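-- pv_equiv track=rewrite | github.com/ganglike248/BaekjoonStudy | 프로그래머스/1/17681. ［1차］ 비밀지도/［1차］ 비밀지도.py | solution
-- ===== SOURCE A (Python) =====
-- def solution(n, arr1, arr2):
--     answer = []
--     barr1 = [[] for _ in range(n)]
--     barr2 = [[] for _ in range(n)]
--
--     # 바이너리 2차원 배열로 변환
--     for i in range(n):
--         barr1[i] = list(map(int, format(arr1[i], f'0{n}b')))
--         barr2[i] = list(map(int, format(arr2[i], f'0{n}b')))
--
--     for i in range(n):
--         a = ""
--         for j in range(n):
--             if barr1[i][j] == 1 or barr2[i][j] == 1: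
--                 a += "#"
--             elif barr1[i][j] == 0 and barr2[i][j] == 0:
--                 a += " "
--         answer.append(a)
--
--     return answer
-- ===== SOURCE B (Python) =====
-- _TRANS = str.maketrans('10', '# ')
--
-- def solution(n, arr1, arr2):
--     # OR the two row masks as integers, render each as an n-wide binary string,
--     # and translate digits to '#'/' ' in one pass -- no 2-D bit arrays.
--     return [format(arr1[i] | arr2[i], f'0{n}b').translate(_TRANS) for i in range(n)]
-- ===== Notes on version B (the rewrite author's own statement) =====
-- stated objective: simpler
-- what changed: B drops A's two 2-D binary digit arrays and the per-cell comparison loop: it ORs the two row masks as integers and renders each row with one n-wide binary format plus a single character translation.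
-- outside the precondition, e.g. on solution(1, [2], [0]): A returns ['#'], B returns ['# ']
import Mathlib
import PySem

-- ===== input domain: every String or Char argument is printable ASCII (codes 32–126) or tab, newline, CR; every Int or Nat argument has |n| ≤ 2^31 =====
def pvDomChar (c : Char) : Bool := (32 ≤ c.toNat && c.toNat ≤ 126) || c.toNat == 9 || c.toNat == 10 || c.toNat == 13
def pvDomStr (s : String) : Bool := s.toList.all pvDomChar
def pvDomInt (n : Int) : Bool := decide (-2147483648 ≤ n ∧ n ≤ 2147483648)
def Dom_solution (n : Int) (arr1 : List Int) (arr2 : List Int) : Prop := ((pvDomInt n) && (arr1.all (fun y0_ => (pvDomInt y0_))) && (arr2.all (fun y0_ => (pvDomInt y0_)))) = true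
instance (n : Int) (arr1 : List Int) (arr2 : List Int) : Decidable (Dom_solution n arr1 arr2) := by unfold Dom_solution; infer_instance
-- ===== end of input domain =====

-- B replaces A's two 2-D digit arrays and per-cell comparison loop by an integer OR
-- per row plus a single character translation of the zero-padded binary string (objective: simpler).

-- shared helper: exact port of Python's format(v, f'0{n}b') as a char list (both Pythons call this builtin).
-- pvBitsChars m v = the m binary digits of v, most significant first
def pvBitsChars (m : Nat) (v : Nat) : List Char :=
  (List.range m).map (fun j => if v.testBit (m - 1 - j) then '1' else '0')

def pvPad (w : Nat) (s : List Char) : List Char := List.replicate (w - s.length) '0' ++ s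

-- format(v, f'0{n}b'): binary digits of |v|, zero-padded to total width n, '-' first for v < 0
def pyFormatBin (v : Int) (n : Int) : List Char :=
  if v < 0 then '-' :: pvPad (n.toNat - 1) (pvBitsChars (Nat.log2 v.natAbs + 1) v.natAbs)
  else pvPad n.toNat (pvBitsChars (Nat.log2 v.toNat + 1) v.toNat)

-- ===== PORT A =====
-- int(c) for a single digit char (exact on digit chars; Pre_ keeps A's format output sign-free)
def pyDigitInt (c : Char) : Int := (c.toNat : Int) - 48

def solution (n : Int) (arr1 : List Int) (arr2 : List Int) : List String :=
  let barr1 := (PySem.List.pyRange 0 n 1).map (fun i => (pyFormatBin (PySem.List.pyGetD arr1 i 0) n).map pyDigitInt)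
  let barr2 := (PySem.List.pyRange 0 n 1).map (fun i => (pyFormatBin (PySem.List.pyGetD arr2 i 0) n).map pyDigitInt)
  (PySem.List.pyRange 0 n 1).map (fun i =>
    String.ofList ((PySem.List.pyRange 0 n 1).foldl (fun a j =>
      if PySem.List.pyGetD (PySem.List.pyGetD barr1 i []) j 0 = 1 ∨ PySem.List.pyGetD (PySem.List.pyGetD barr2 i []) j 0 = 1 then a ++ ['#']
      else if PySem.List.pyGetD (PySem.List.pyGetD barr1 i []) j 0 = 0 ∧ PySem.List.pyGetD (PySem.List.pyGetD barr2 i []) j 0 = 0 then a ++ [' ']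
      else a) []))

-- ===== PORT B =====
-- str.translate(str.maketrans('10', '# ')): a per-character map
def pvTrans (c : Char) : Char := if c = '1' then '#' else if c = '0' then ' ' else c

def solution_alt (n : Int) (arr1 : List Int) (arr2 : List Int) : List String :=
  (PySem.List.pyRange 0 n 1).map (fun i =>
    String.ofList ((pyFormatBin (PySem.Int.bor (PySem.List.pyGetD arr1 i 0) (PySem.List.pyGetD arr2 i 0)) n).map pvTrans))

-- ===== PRECONDITION & SPEC =====
-- Pre_ excludes rows A raises on (lists shorter than n: IndexError; negative entries: int() hits the
-- sign and raises ValueError) and, among inputs A returns on, entries ≥ 2^n: such a value is outside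
-- the n×n map, and there A ORs only the first n characters of two left-aligned binary strings of
-- different lengths while B renders a row wider than n — neither behaviour is specified.
def Pre_solution (n : Int) (arr1 : List Int) (arr2 : List Int) : Prop :=
  n ≤ (arr1.length : Int) ∧ n ≤ (arr2.length : Int) ∧
  (∀ x ∈ arr1.take n.toNat, 0 ≤ x ∧ x < 2 ^ n.toNat) ∧
  (∀ x ∈ arr2.take n.toNat, 0 ≤ x ∧ x < 2 ^ n.toNat)
instance (n : Int) (arr1 : List Int) (arr2 : List Int) : Decidable (Pre_solution n arr1 arr2) := by unfold Pre_solution; infer_instance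

def pvWitness_solution : Int × List Int × List Int := (2, [1, 2], [2, 1])

def Spec_solution (n : Int) (arr1 : List Int) (arr2 : List Int) (out : List String) : Prop := out = solution_alt n arr1 arr2
instance (n : Int) (arr1 : List Int) (arr2 : List Int) (out : List String) : Decidable (Spec_solution n arr1 arr2 out) := by unfold Spec_solution; infer_instance

-- ===== CLAIM (what is proved, stated in full; the proofs are below) =====
def Claim_equal_solution : Prop := ∀ (n : Int) (arr1 : List Int) (arr2 : List Int), Dom_solution n arr1 arr2 → Pre_solution n arr1 arr2 → Spec_solution n arr1 arr2 (solution n arr1 arr2)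
-- ===== LEMMAS AND PROOFS =====

theorem pvBitsChars_length (m v : Nat) : (pvBitsChars m v).length = m := by
  simp [pvBitsChars]

theorem pvBitsChars_getElem (m v k : Nat) (hk : k < m) :
    (pvBitsChars m v)[k]'(by simp [pvBitsChars]; omega) = if v.testBit (m - 1 - k) then '1' else '0' := by
  simp [pvBitsChars]

theorem pvBitsChars_shift (k m v : Nat) (hv : v < 2 ^ k) (hk : k ≤ m) :
    pvBitsChars m v = List.replicate (m - k) '0' ++ pvBitsChars k v := by
  apply List.ext_getElem
  · simp [pvBitsChars_length]; omega
  · intro j h1 h2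
    have hj : j < m := by simpa [pvBitsChars_length] using h1
    rw [pvBitsChars_getElem m v j hj]
    rcases lt_or_ge j (m - k) with hjk | hjk
    · rw [List.getElem_append_left (by simpa using hjk)]
      simp only [List.getElem_replicate]
      have hbit : v.testBit (m - 1 - j) = false :=
        Nat.testBit_lt_two_pow (lt_of_lt_of_le hv (Nat.pow_le_pow_right (by norm_num) (by omega)))
      simp [hbit]
    · rw [List.getElem_append_right (by simpa using hjk)]
      simp only [List.length_replicate]
      rw [pvBitsChars_getElem k v (j - (m - k)) (by omega)]
      have harg : m - 1 - j = k - 1 - (j - (m - k)) := by omega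
      rw [harg]

theorem pyFormatBin_eq (v : Int) (n : Int) (h0 : 0 ≤ v) (hv : v.toNat < 2 ^ n.toNat) (hn : 1 ≤ n.toNat) :
    pyFormatBin v n = pvBitsChars n.toNat v.toNat := by
  unfold pyFormatBin pvPad
  rw [if_neg (by omega)]
  have hk : Nat.log2 v.toNat + 1 ≤ n.toNat := by
    rcases Nat.eq_zero_or_pos v.toNat with h | h
    · simp [h, Nat.log2]; omega
    · have := (Nat.log2_lt (by omega)).mpr hv
      omega
  rw [pvBitsChars_length, pvBitsChars_shift (Nat.log2 v.toNat + 1) n.toNat v.toNat Nat.lt_log2_self hk]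

theorem pvTrans_bit (b : Bool) : pvTrans (if b then '1' else '0') = if b then '#' else ' ' := by
  cases b <;> decide

theorem row_eq (n : Int) (hn : 0 ≤ n) (v1 v2 : Nat) :
    ((PySem.List.pyRange 0 n 1).foldl (fun a j =>
      if PySem.List.pyGetD ((pvBitsChars n.toNat v1).map pyDigitInt) j 0 = 1 ∨ PySem.List.pyGetD ((pvBitsChars n.toNat v2).map pyDigitInt) j 0 = 1 then a ++ ['#']
      else if PySem.List.pyGetD ((pvBitsChars n.toNat v1).map pyDigitInt) j 0 = 0 ∧ PySem.List.pyGetD ((pvBitsChars n.toNat v2).map pyDigitInt) j 0 = 0 then a ++ [' ']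
      else a) [])
    = (pvBitsChars n.toNat (v1 ||| v2)).map pvTrans := by
  have hget : ∀ (v : Nat) (j : Int), 0 ≤ j → j < n →
      PySem.List.pyGetD ((pvBitsChars n.toNat v).map pyDigitInt) j 0
        = if v.testBit (n.toNat - 1 - j.toNat) then 1 else 0 := by
    intro v j hj0 hjm
    have hjl : j.toNat < n.toNat := by omega
    rw [PySem.List.pyGetD_of_nonneg _ _ hj0,
        List.getD_eq_getElem _ _ (by simp [pvBitsChars_length]; omega)]
    rw [List.getElem_map]
    rw [pvBitsChars_getElem n.toNat v j.toNat hjl]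
    by_cases hb : v.testBit (n.toNat - 1 - j.toNat) <;> simp [hb, pyDigitInt]
  rw [PySem.List.foldl_congr_mem _ _
      (fun a j => a ++ [if (v1 ||| v2).testBit (n.toNat - 1 - j.toNat) then '#' else ' ']) _
      (by
        intro acc j hj
        obtain ⟨hj0, hjm⟩ := PySem.List.mem_pyRange_one.mp hj
        rw [hget v1 j hj0 hjm, hget v2 j hj0 hjm]
        by_cases h1 : v1.testBit (n.toNat - 1 - j.toNat) <;>
          by_cases h2 : v2.testBit (n.toNat - 1 - j.toNat) <;>
            simp [h1, h2, Nat.testBit_or])]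
  rw [PySem.List.foldl_append_singleton_eq_map]
  simp only [List.nil_append]
  apply List.ext_getElem
  · simp [PySem.List.pyRange_one, pvBitsChars_length]
  · intro k h1 h2
    have hk : k < n.toNat := by simpa [pvBitsChars_length] using h2
    simp only [PySem.List.pyRange_one, List.map_map, List.getElem_map, List.getElem_range,
      Function.comp]
    rw [pvBitsChars_getElem n.toNat (v1 ||| v2) k hk, pvTrans_bit]
    norm_num

-- ===== VERDICT (by name: the statement is the Claim_ definition above) =====
theorem solution_spec : Claim_equal_solution := by
  intro n arr1 arr2 _ hpre
  obtain ⟨hl1, hl2, hb1, hb2⟩ := hpre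
  show solution n arr1 arr2 = solution_alt n arr1 arr2
  unfold solution solution_alt
  simp only []
  apply List.map_congr_left
  intro i hi
  obtain ⟨hi0, hin⟩ := PySem.List.mem_pyRange_one.mp hi
  have hm1 : 1 ≤ n.toNat := by omega
  rw [PySem.List.pyGetD_map_pyRange_of_nonneg _ n i _ hi0 hin,
      PySem.List.pyGetD_map_pyRange_of_nonneg _ n i _ hi0 hin]
  -- facts about the two row values
  have hval : ∀ (arr : List Int), n ≤ (arr.length : Int) →
      (∀ x ∈ arr.take n.toNat, 0 ≤ x ∧ x < 2 ^ n.toNat) →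
      0 ≤ PySem.List.pyGetD arr i 0 ∧ PySem.List.pyGetD arr i 0 < 2 ^ n.toNat := by
    intro arr hl hb
    have hilt : i.toNat < arr.length := by omega
    rw [PySem.List.pyGetD_of_nonneg _ _ hi0, List.getD_eq_getElem _ _ hilt]
    exact hb _ (by
      have hlt : i.toNat < (arr.take n.toNat).length := by simp; omega
      have : (arr.take n.toNat)[i.toNat]'hlt = arr[i.toNat]'hilt := List.getElem_take
      rw [← this]
      exact List.getElem_mem hlt)
  obtain ⟨h10, h1lt⟩ := hval arr1 hl1 hb1
  obtain ⟨h20, h2lt⟩ := hval arr2 hl2 hb2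
  set v1 := PySem.List.pyGetD arr1 i 0 with hv1
  set v2 := PySem.List.pyGetD arr2 i 0 with hv2
  have hor : PySem.Int.bor v1 v2 = ((v1.toNat ||| v2.toNat : Nat) : Int) :=
    PySem.Int.bor_of_nonneg h10 h20
  have h1n : v1.toNat < 2 ^ n.toNat := by
    rw [← Int.toNat_of_nonneg h10] at h1lt; exact_mod_cast h1lt
  have h2n : v2.toNat < 2 ^ n.toNat := by
    rw [← Int.toNat_of_nonneg h20] at h2lt; exact_mod_cast h2lt
  rw [pyFormatBin_eq v1 n h10 h1n hm1, pyFormatBin_eq v2 n h20 h2n hm1, hor,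
      pyFormatBin_eq _ n (by positivity) (by simpa using Nat.or_lt_two_pow h1n h2n) hm1]
  congr 1
  exact row_eq n (by omega) v1.toNat v2.toNat
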